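-- pv_equiv track=rewrite | github.com/dalvagon/Leahu-Vlad-Iulius-A6-Python | lab2/ex3.py | sets_operations
-- ===== SOURCE A (Python) =====
-- def sets_operations(set_a, set_b):
--     def union(set_a, set_b):
--         set_c = []
--         for number in set_a + set_b:
--             if not number in set_c:
--                 set_c.append(number)
--
--         return set_c
--
--     def intersection(set_a, set_b):
--         set_c = []
--         for number in set_a + set_b:
--             if not number in set_c and number in set_a and number in set_b:
--                 set_c.append(number)
--
--         return set_c
--
--     def difference_a(set_a, set_b):
--         set_c = []
--         for number in set_a + set_b:
--             if not number in set_c and number in set_a and not number in set_b: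
--                 set_c.append(number)
--
--         return set_c
--
--     def difference_b(set_a, set_b):
--         set_c = []
--         for number in set_a + set_b:
--             if not number in set_c and not number in set_a and number in set_b:
--                 set_c.append(number)
--
--         return set_c
--
--     return (
--         union(set_a, set_b),
--         intersection(set_a, set_b),
--         difference_a(set_a, set_b),
--         difference_b(set_a, set_b),
--     )
-- ===== SOURCE B (Python) =====
-- def sets_operations(set_a, set_b):
--     union, inter, diff_a, diff_b = [], [], [], []
--     for x in set_a + set_b:
--         if x not in union:
--             union.append(x)
--             if x in set_a and x in set_b:
--                 inter.append(x)
--             elif x in set_a: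
--                 diff_a.append(x)
--             else:
--                 diff_b.append(x)
--     return (union, inter, diff_a, diff_b)
-- ===== Notes on version B (the rewrite author's own statement) =====
-- stated objective: faster
-- what changed: Replaces A's four independent dedup-and-filter passes over set_a+set_b with a single pass that maintains one seen/union list and classifies each new element into intersection, difference_a or difference_b at once.
import Mathlib
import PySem

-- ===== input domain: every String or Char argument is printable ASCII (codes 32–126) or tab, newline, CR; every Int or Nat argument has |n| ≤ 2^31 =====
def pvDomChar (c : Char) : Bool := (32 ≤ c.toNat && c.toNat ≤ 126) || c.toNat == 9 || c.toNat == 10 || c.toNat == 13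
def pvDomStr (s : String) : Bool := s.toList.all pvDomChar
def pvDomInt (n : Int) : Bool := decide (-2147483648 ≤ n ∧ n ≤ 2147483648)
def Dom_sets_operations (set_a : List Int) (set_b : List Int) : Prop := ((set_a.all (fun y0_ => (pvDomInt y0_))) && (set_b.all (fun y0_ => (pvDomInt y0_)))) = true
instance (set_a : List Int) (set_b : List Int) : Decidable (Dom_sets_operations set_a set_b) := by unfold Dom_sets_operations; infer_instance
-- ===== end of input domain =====

-- B replaces A's four independent dedup-filter passes over set_a + set_b with a single
-- classifying pass that maintains one seen/union list (constant-factor change; equivalence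
-- is about the returned value).

-- ===== PORT A =====
-- helper `union` of A
def pyUnion (set_a set_b : List Int) : List Int :=
  (set_a ++ set_b).foldl
    (fun set_c number => if ¬ number ∈ set_c then set_c ++ [number] else set_c) []

-- helper `intersection` of A
def pyIntersection (set_a set_b : List Int) : List Int :=
  (set_a ++ set_b).foldl
    (fun set_c number =>
      if ¬ number ∈ set_c ∧ number ∈ set_a ∧ number ∈ set_b then set_c ++ [number] else set_c) []

-- helper `difference_a` of A
def pyDifferenceA (set_a set_b : List Int) : List Int :=
  (set_a ++ set_b).foldl
    (fun set_c number =>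
      if ¬ number ∈ set_c ∧ number ∈ set_a ∧ ¬ number ∈ set_b then set_c ++ [number] else set_c) []

-- helper `difference_b` of A
def pyDifferenceB (set_a set_b : List Int) : List Int :=
  (set_a ++ set_b).foldl
    (fun set_c number =>
      if ¬ number ∈ set_c ∧ ¬ number ∈ set_a ∧ number ∈ set_b then set_c ++ [number] else set_c) []

def sets_operations (set_a : List Int) (set_b : List Int) : List (List Int) :=
  [pyUnion set_a set_b, pyIntersection set_a set_b,
   pyDifferenceA set_a set_b, pyDifferenceB set_a set_b]

-- ===== PORT B =====
-- single pass: the body of B's `for` loop as a fold over (union, inter, diff_a, diff_b)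
def altStep (set_a set_b : List Int)
    (st : List Int × List Int × List Int × List Int) (x : Int) :
    List Int × List Int × List Int × List Int :=
  let (u, i, da, db) := st
  if ¬ x ∈ u then
    if x ∈ set_a ∧ x ∈ set_b then (u ++ [x], i ++ [x], da, db)
    else if x ∈ set_a then (u ++ [x], i, da ++ [x], db)
    else (u ++ [x], i, da, db ++ [x])
  else st

def sets_operations_alt (set_a : List Int) (set_b : List Int) : List (List Int) :=
  let st := (set_a ++ set_b).foldl (altStep set_a set_b) ([], [], [], [])
  [st.1, st.2.1, st.2.2.1, st.2.2.2]

-- ===== PRECONDITION & SPEC =====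
def Spec_sets_operations (set_a : List Int) (set_b : List Int) (out : List (List Int)) : Prop := out = sets_operations_alt set_a set_b
instance (set_a : List Int) (set_b : List Int) (out : List (List Int)) : Decidable (Spec_sets_operations set_a set_b out) := by unfold Spec_sets_operations; infer_instance

-- ===== CLAIM (what is proved, stated in full; the proofs are below) =====
def Claim_equal_sets_operations : Prop := ∀ (set_a : List Int) (set_b : List Int), Dom_sets_operations set_a set_b → Spec_sets_operations set_a set_b (sets_operations set_a set_b)

-- ===== LEMMAS AND PROOFS =====

-- generic shape of A's four helpers
def afold (p : Int → Prop) [DecidablePred p] (l c : List Int) : List Int :=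
  l.foldl (fun c x => if ¬ x ∈ c ∧ p x then c ++ [x] else c) c

lemma afold_filter (p : Int → Prop) [DecidablePred p] (l u : List Int) :
    afold p l (u.filter (fun x => decide (p x)))
      = (afold (fun _ => True) l u).filter (fun x => decide (p x)) := by
  induction l generalizing u with
  | nil => simp [afold]
  | cons x l ih =>
    simp only [afold, List.foldl_cons] at *
    by_cases hp : p x
    · by_cases hu : x ∈ u
      · have : x ∈ u.filter (fun x => decide (p x)) := by simp [hu, hp]
        simpa [hu, hp, this] using ih u
      · have : ¬ x ∈ u.filter (fun x => decide (p x)) := by simp [hu]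
        have h2 : (u ++ [x]).filter (fun x => decide (p x))
            = u.filter (fun x => decide (p x)) ++ [x] := by simp [hp]
        simpa [hu, hp, this, h2] using ih (u ++ [x])
    · by_cases hu : x ∈ u
      · simpa [hu, hp] using ih u
      · have h2 : (u ++ [x]).filter (fun x => decide (p x))
            = u.filter (fun x => decide (p x)) := by simp [hp]
        simpa [hu, hp, h2] using ih (u ++ [x])

-- the single-pass fold keeps the three classified lists as filters of the seen list
lemma altfold_eq (set_a set_b l u : List Int) (hl : ∀ x ∈ l, x ∈ set_a ∨ x ∈ set_b) :
    l.foldl (altStep set_a set_b)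
      (u, u.filter (fun x => decide (x ∈ set_a ∧ x ∈ set_b)),
          u.filter (fun x => decide (x ∈ set_a ∧ ¬ x ∈ set_b)),
          u.filter (fun x => decide (¬ x ∈ set_a ∧ x ∈ set_b)))
      = (afold (fun _ => True) l u,
         (afold (fun _ => True) l u).filter (fun x => decide (x ∈ set_a ∧ x ∈ set_b)),
         (afold (fun _ => True) l u).filter (fun x => decide (x ∈ set_a ∧ ¬ x ∈ set_b)),
         (afold (fun _ => True) l u).filter (fun x => decide (¬ x ∈ set_a ∧ x ∈ set_b))) := by
  induction l generalizing u with
  | nil => simp [afold]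
  | cons x l ih =>
    have hx := hl x (by simp)
    have hl' : ∀ y ∈ l, y ∈ set_a ∨ y ∈ set_b := fun y hy => hl y (by simp [hy])
    simp only [afold, List.foldl_cons] at *
    by_cases hu : x ∈ u
    · simpa [altStep, hu] using ih u hl'
    · by_cases ha : x ∈ set_a <;> by_cases hb : x ∈ set_b
      · have := ih (u ++ [x]) hl'
        simpa [altStep, hu, ha, hb] using this
      · have := ih (u ++ [x]) hl'
        simpa [altStep, hu, ha, hb] using this
      · have := ih (u ++ [x]) hl'
        simpa [altStep, hu, ha, hb] using this
      · exact absurd hx (by simp [ha, hb])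

lemma pyUnion_eq (set_a set_b : List Int) :
    pyUnion set_a set_b = afold (fun _ => True) (set_a ++ set_b) [] := by
  simp [pyUnion, afold]

theorem sets_operations_eq_alt (set_a set_b : List Int) :
    sets_operations set_a set_b = sets_operations_alt set_a set_b := by
  have hl : ∀ x ∈ set_a ++ set_b, x ∈ set_a ∨ x ∈ set_b := by
    intro x hx; simpa using hx
  have key := altfold_eq set_a set_b (set_a ++ set_b) [] hl
  have hi : pyIntersection set_a set_b
      = afold (fun x => x ∈ set_a ∧ x ∈ set_b) (set_a ++ set_b) [] := rfl
  have hda : pyDifferenceA set_a set_b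
      = afold (fun x => x ∈ set_a ∧ ¬ x ∈ set_b) (set_a ++ set_b) [] := rfl
  have hdb : pyDifferenceB set_a set_b
      = afold (fun x => ¬ x ∈ set_a ∧ x ∈ set_b) (set_a ++ set_b) [] := rfl
  have f1 := afold_filter (fun x => x ∈ set_a ∧ x ∈ set_b) (set_a ++ set_b) []
  have f2 := afold_filter (fun x => x ∈ set_a ∧ ¬ x ∈ set_b) (set_a ++ set_b) []
  have f3 := afold_filter (fun x => ¬ x ∈ set_a ∧ x ∈ set_b) (set_a ++ set_b) []
  simp only [List.filter_nil] at f1 f2 f3 key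
  simp only [sets_operations, sets_operations_alt]
  rw [key, pyUnion_eq, hi, hda, hdb, f1, f2, f3]

-- ===== VERDICT (by name: the statement is the Claim_ definition above) =====
theorem sets_operations_spec : Claim_equal_sets_operations := by
  intro set_a set_b _
  unfold Spec_sets_operations
  exact sets_operations_eq_alt set_a set_b
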